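-- pv_equiv track=rewrite | github.com/IazaKana/algorithm_2023 | Coding_test/inflearn_codingtest_python/section3/3n4.py | solution
-- ===== SOURCE A (Python) =====
-- from collections import Counter
--
-- def solution(s):
--     answer = False
--     nH = Counter(s)
--     n = 0
--     for key in nH:
--         if nH[key] % 2 == 1:
--             n += 1
--
--     if n % 2 == 0:
--         answer = False
--     else:
--         answer = True
--
--     return answer
-- ===== SOURCE B (Python) =====
-- def solution(s):
--     odd = set()
--     for c in s:
--         if c in odd:
--             odd.discard(c)
--         else:
--             odd.add(c)
--     return len(odd) % 2 == 1
-- ===== Notes on version B (the rewrite author's own statement) =====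
-- stated objective: simpler
-- what changed: Replaces the Counter plus a second loop over its keys by a single pass that toggles each character in a parity set, then tests the set's size for oddness.
import Mathlib
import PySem

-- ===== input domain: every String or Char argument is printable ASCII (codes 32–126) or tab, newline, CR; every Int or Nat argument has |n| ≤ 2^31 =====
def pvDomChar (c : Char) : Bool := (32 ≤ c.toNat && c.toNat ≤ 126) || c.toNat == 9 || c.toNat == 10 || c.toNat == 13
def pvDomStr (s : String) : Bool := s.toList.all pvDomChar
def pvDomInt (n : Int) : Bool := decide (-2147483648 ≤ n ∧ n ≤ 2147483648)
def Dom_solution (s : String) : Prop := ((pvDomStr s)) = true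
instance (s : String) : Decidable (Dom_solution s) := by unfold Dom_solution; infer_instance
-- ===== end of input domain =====

-- B replaces the Counter + second key loop of A by one toggle-set pass; same O(n) cost, simpler.

-- ===== PORT A =====
def solution (s : String) : Bool :=
  let nH := PySem.Dict.counter s.toList
  let n : Int := nH.keys.foldl (fun n key => if PySem.Int.mod (nH.getD key 0) 2 == 1 then n + 1 else n) 0
  if PySem.Int.mod n 2 == 0 then false else true

-- ===== PORT B =====
def solution_alt (s : String) : Bool :=
  let odd : PySem.Set Char := s.toList.foldl
    (fun odd c => if odd.contains c then odd.discard c else odd.add c) PySem.Set.empty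
  PySem.Int.mod (PySem.Set.len odd) 2 == 1

-- ===== PRECONDITION & SPEC =====
def Spec_solution (s : String) (out : Bool) : Prop := out = solution_alt s
instance (s : String) (out : Bool) : Decidable (Spec_solution s out) := by unfold Spec_solution; infer_instance

-- ===== CLAIM (what is proved, stated in full; the proofs are below) =====
def Claim_equal_solution : Prop := ∀ (s : String), Dom_solution s → Spec_solution s (solution s)

-- ===== LEMMAS AND PROOFS =====

-- B's toggle loop: the accumulated set stays nodup and contains exactly the elements that are in
-- acc with an even remaining count, or out of acc with an odd remaining count.
theorem toggle_invariant (l : List Char) : ∀ (acc : PySem.Set Char), acc.Nodup →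
    (List.Nodup (l.foldl (fun (odd : PySem.Set Char) c => if odd.contains c then odd.discard c else odd.add c) acc) ∧
     ∀ x, x ∈ l.foldl (fun (odd : PySem.Set Char) c => if odd.contains c then odd.discard c else odd.add c) acc ↔
       ((x ∈ acc ∧ l.count x % 2 = 0) ∨ (x ∉ acc ∧ l.count x % 2 = 1))) := by
  induction l with
  | nil => intro acc h; simp [h]
  | cons c t ih =>
    intro acc hnd
    by_cases hc : c ∈ acc
    · have hcont : acc.contains c = true := (PySem.Set.contains_iff acc c).mpr hc
      have hrec := ih (acc.discard c) (PySem.Set.nodup_discard acc c hnd)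
      simp only [List.foldl_cons, hcont, if_pos]
      refine ⟨hrec.1, fun x => ?_⟩
      rw [hrec.2 x]
      simp only [PySem.Set.mem_discard]
      by_cases hx : x = c
      · subst hx
        simp [hc, List.count_cons_self]
        try omega
      · simp [hx, List.count_cons_of_ne (Ne.symm hx)]
        try tauto
    · have hcont : acc.contains c = false := by
        rw [← Bool.not_eq_true, PySem.Set.contains_iff]; exact hc
      have hrec := ih (acc.add c) (PySem.Set.nodup_add acc c hnd)
      simp only [List.foldl_cons, hcont, Bool.false_eq_true, if_neg, not_false_iff]
      refine ⟨hrec.1, fun x => ?_⟩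
      rw [hrec.2 x]
      simp only [PySem.Set.mem_add]
      by_cases hx : x = c
      · subst hx
        simp [hc, List.count_cons_self]
        try omega
      · simp [hx, List.count_cons_of_ne (Ne.symm hx)]
        try tauto

-- A's key loop is a filter-count over the keys.
theorem foldl_count_filter (p : Char → Bool) (ks : List Char) : ∀ (n : Int),
    ks.foldl (fun n key => if p key then n + 1 else n) n = n + ((ks.filter p).length : Int) := by
  induction ks with
  | nil => intro n; simp
  | cons k t ih =>
    intro n
    by_cases hk : p k = true
    · simp only [List.foldl_cons, hk, if_pos, ih, List.filter_cons_of_pos hk, List.length_cons]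
      push_cast; ring
    · simp [List.foldl_cons, hk, ih]

-- ===== VERDICT (by name: the statement is the Claim_ definition above) =====
theorem solution_spec : Claim_equal_solution := by
  intro s _
  unfold Spec_solution
  show solution s = solution_alt s
  simp only [solution, solution_alt]
  set l := s.toList with hl
  have htog := toggle_invariant l PySem.Set.empty (by simp [PySem.Set.empty])
  have hA : (PySem.Dict.counter l).keys.foldl
      (fun n key => if PySem.Int.mod ((PySem.Dict.counter l).getD key 0) 2 == 1 then n + 1 else n) (0 : Int)
      = (((PySem.Set.ofList l).filter (fun k => l.count k % 2 == 1)).length : Int) := by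
    rw [PySem.Dict.keys_counter l]
    have heq : ∀ key : Char, (PySem.Int.mod ((PySem.Dict.counter l).getD key 0) 2 == 1)
        = (l.count key % 2 == 1) := by
      intro key
      rw [PySem.Dict.getD_counter l key, PySem.Int.mod_eq_emod_of_pos (by norm_num),
        show ((l.count key : Int) % 2) = ((l.count key % 2 : Nat) : Int) from (Int.natCast_mod _ _).symm]
      rcases Nat.mod_two_eq_zero_or_one (l.count key) with h | h <;> simp [h]
    simp only [heq]
    rw [foldl_count_filter (fun k => l.count k % 2 == 1) (PySem.Set.ofList l) 0]
    simp
  have hperm : List.Perm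
      (l.foldl (fun (odd : PySem.Set Char) c => if odd.contains c then odd.discard c else odd.add c) PySem.Set.empty)
      ((PySem.Set.ofList l).filter (fun k => l.count k % 2 == 1)) := by
    rw [List.perm_ext_iff_of_nodup htog.1 ((PySem.Set.nodup_ofList l).filter _)]
    intro x
    rw [htog.2 x, List.mem_filter, PySem.Set.mem_ofList]
    constructor
    · rintro (⟨hx, _⟩ | ⟨_, hx⟩)
      · exact absurd hx (by simp [PySem.Set.empty])
      · have hpos : 0 < l.count x := by omega
        exact ⟨List.count_pos_iff.mp hpos, by simpa using hx⟩
    · intro ⟨_, hx⟩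
      exact Or.inr ⟨by simp [PySem.Set.empty], by simpa using hx⟩
  have hlen : PySem.Set.len
      (l.foldl (fun (odd : PySem.Set Char) c => if odd.contains c then odd.discard c else odd.add c) PySem.Set.empty)
      = (((PySem.Set.ofList l).filter (fun k => l.count k % 2 == 1)).length : Int) := by
    unfold PySem.Set.len
    rw [hperm.length_eq]
  rw [hA, hlen]
  set m := ((PySem.Set.ofList l).filter (fun k => l.count k % 2 == 1)).length with hm
  rw [PySem.Int.mod_eq_emod_of_pos (by norm_num),
    show ((m : Int) % 2) = ((m % 2 : Nat) : Int) from (Int.natCast_mod _ _).symm]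
  rcases Nat.mod_two_eq_zero_or_one m with h | h <;> simp [h]
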